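-- pv_equiv track=rewrite | github.com/Quantumgame/quantum-ml | junk/dot_classifier_tf/classify_tf.py | add_leads
-- ===== SOURCE A (Python) =====
-- def add_leads(mask):
--     '''
--     Input:
--     mask :  prelim mask with only 'b' or 'd'
--     Output:
--     mask : new mask in which the first and last islands are labelled as 'l'
--     '''
--     # lead1
--     i = 0
--     while(i < len(mask) and mask[i] != 'b'):
--         mask[i] = 'l'
--         i += 1
--     # lead2
--     i = len(mask) - 1
--     while(i > 0 and mask[i] != 'b'):
--         mask[i] = 'l'
--         i -= 1
--
--     return mask
-- ===== SOURCE B (Python) =====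
-- def add_leads(mask):
--     # Two element-wise 'seen b' flag passes (no index arithmetic): the pass
--     # relabels each element to 'l' until a 'b' has been seen; applying it
--     # left-to-right and then to the reversed result labels both outer islands.
--     # Mutates mask in place (like the original) and returns it.
--     def relabel_until_b(xs):
--         out = []
--         seen = False
--         for x in xs:
--             seen = seen or x == 'b'
--             out.append(x if seen else 'l')
--         return out
--     res = relabel_until_b(relabel_until_b(mask)[::-1])[::-1]
--     mask[:] = res
--     return mask
-- ===== Notes on version B (the rewrite author's own statement) =====
-- stated objective: alternative
-- what changed: B replaces A's two index-based in-place while loops by a purely element-wise 'seen b' flag fold (relabel-until-b) applied once left-to-right and once to the reversed result, using no indices at all; the result is copied back into the argument list.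
import Mathlib
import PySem

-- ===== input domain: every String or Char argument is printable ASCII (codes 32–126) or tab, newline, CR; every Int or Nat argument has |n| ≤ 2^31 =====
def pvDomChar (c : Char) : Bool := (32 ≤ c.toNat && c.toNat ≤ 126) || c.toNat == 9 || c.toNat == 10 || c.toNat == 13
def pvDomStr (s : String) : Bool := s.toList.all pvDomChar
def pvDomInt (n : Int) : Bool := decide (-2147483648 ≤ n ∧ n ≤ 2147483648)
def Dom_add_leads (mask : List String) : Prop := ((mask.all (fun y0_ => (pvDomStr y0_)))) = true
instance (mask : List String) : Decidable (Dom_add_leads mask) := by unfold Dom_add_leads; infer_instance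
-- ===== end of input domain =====

-- B replaces A's two index-based in-place while loops by an element-wise
-- 'seen b' flag fold (relabel-until-b), applied left-to-right and then to the
-- reversed result; no index arithmetic at all. Both Pythons mutate the argument
-- list in place identically; the equivalence proved here is about the returned value.

-- ===== PORT A =====
-- first while loop: i walks up, setting 'l' until a 'b' (or the end)
def leadFst (m : List String) (i : Nat) : List String :=
  if h : i < m.length ∧ m[i]! ≠ "b" then
    leadFst (m.set i "l") (i + 1)
  else m
termination_by m.length - i
decreasing_by simp [List.length_set]; omega

-- second while loop: i walks down from len-1, setting 'l' until a 'b' (or i = 0)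
def leadSnd (m : List String) (i : Nat) : List String :=
  if h : 0 < i ∧ m[i]! ≠ "b" then
    leadSnd (m.set i "l") (i - 1)
  else m
termination_by i

def add_leads (mask : List String) : List String :=
  let m1 := leadFst mask 0
  leadSnd m1 (m1.length - 1)

-- ===== PORT B =====
-- relabel_until_b: a fold carrying the 'seen' flag and the output list built by append;
-- Python's xs[::-1] on a whole list is exactly List.reverse.
def passB (xs : List String) : List String :=
  (xs.foldl
    (fun (p : Bool × List String) x =>
      let seen := p.1 || (x == "b")
      (seen, p.2 ++ [if seen then x else "l"]))
    (false, [])).2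

def add_leads_alt (mask : List String) : List String :=
  (passB ((passB mask).reverse)).reverse

-- ===== PRECONDITION & SPEC =====
def Spec_add_leads (mask : List String) (out : List String) : Prop := out = add_leads_alt mask
instance (mask : List String) (out : List String) : Decidable (Spec_add_leads mask out) := by unfold Spec_add_leads; infer_instance

-- ===== CLAIM (what is proved, stated in full; the proofs are below) =====
def Claim_equal_add_leads : Prop := ∀ (mask : List String), Dom_add_leads mask → Spec_add_leads mask (add_leads mask)

-- ===== LEMMAS AND PROOFS =====

-- structural version of B's relabel_until_b pass
def fpass (seen : Bool) : List String → List String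
  | [] => []
  | x :: t =>
      let s := seen || (x == "b")
      (if s then x else "l") :: fpass s t

theorem foldl_eq_fpass (xs : List String) (s : Bool) (acc : List String) :
    (xs.foldl
      (fun (p : Bool × List String) x =>
        let seen := p.1 || (x == "b")
        (seen, p.2 ++ [if seen then x else "l"]))
      (s, acc)).2 = acc ++ fpass s xs := by
  induction xs generalizing s acc with
  | nil => simp [fpass]
  | cons x t ih =>
      simp only [List.foldl_cons]
      exact (ih (s || (x == "b")) (acc ++ [if (s || (x == "b")) then x else "l"])).trans
        (by simp [fpass])

theorem passB_eq (xs : List String) : passB xs = fpass false xs :=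
  (foldl_eq_fpass xs false []).trans (List.nil_append _)

theorem fpass_length (s : Bool) (l : List String) : (fpass s l).length = l.length := by
  induction l generalizing s with
  | nil => rfl
  | cons x t ih => simp [fpass, ih]

theorem fpass_true (l : List String) : fpass true l = l := by
  induction l with
  | nil => rfl
  | cons x t ih => simp [fpass, ih]

-- index of the first "b" (or length)
def firstB : List String → Nat
  | [] => 0
  | x :: t => if x == "b" then 0 else firstB t + 1

theorem firstB_le (m : List String) : firstB m ≤ m.length := by
  induction m with
  | nil => simp [firstB]
  | cons x t ih =>
      by_cases hx : x = "b" <;> simp [firstB, hx] <;> omega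

theorem firstB_lt_b (m : List String) (h : firstB m < m.length) : m[firstB m]'h = "b" := by
  induction m with
  | nil => simp at h
  | cons x t ih =>
      by_cases hx : x = "b"
      · simp [firstB, hx]
      · have hb : (x == "b") = false := by simpa using hx
        simp only [firstB, hb, Bool.false_eq_true, if_false]
        simp only [firstB, hb, Bool.false_eq_true, if_false, List.length_cons] at h
        simpa using ih (by omega)

theorem firstB_pre (m : List String) (j : Nat) (hj : j < firstB m) (hjl : j < m.length) :
    m[j] ≠ "b" := by
  induction m generalizing j with
  | nil => simp at hjl
  | cons x t ih =>
      by_cases hx : x = "b"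
      · simp [firstB, hx] at hj
      · have hb : (x == "b") = false := by simpa using hx
        simp only [firstB, hb, Bool.false_eq_true, if_false] at hj
        cases j with
        | zero => simpa using hx
        | succ j' =>
            simpa using ih j' (by omega) (by simpa using hjl)

theorem fpass_get (m : List String) (j : Nat) :
    (fpass false m)[j]? = if j < firstB m then some "l" else m[j]? := by
  induction m generalizing j with
  | nil => simp [fpass, firstB]
  | cons x t ih =>
      by_cases hx : x = "b"
      · simp [fpass, firstB, hx, fpass_true]
      · have hb : (x == "b") = false := by simpa using hx
        simp only [fpass, hb, Bool.false_or, Bool.false_eq_true, if_false, firstB]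
        cases j with
        | zero => simp
        | succ j' =>
            simp only [List.getElem?_cons_succ]
            rw [ih j']
            by_cases hc : j' < firstB t
            · rw [if_pos hc, if_pos (by omega)]
            · rw [if_neg hc, if_neg (by omega)]

-- stopF m i: where A's first while loop stops; stopB m i: where the second one stops
def stopF (m : List String) (i : Nat) : Nat :=
  if h : i < m.length ∧ m[i]! ≠ "b" then stopF m (i + 1) else i
termination_by m.length - i

theorem stopF_ge (m : List String) (i : Nat) : i ≤ stopF m i := by
  fun_induction stopF m i with
  | case1 i h ih => omega
  | case2 i h => omega

theorem stopF_set_lt (m : List String) (k : Nat) (x : String) (i : Nat) (hk : k < i) :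
    stopF (m.set k x) i = stopF m i := by
  fun_induction stopF m i with
  | case1 i h ih =>
      obtain ⟨h1, h2⟩ := h
      rw [stopF]
      have hlen : (m.set k x).length = m.length := by simp
      have hget : (m.set k x)[i]! = m[i]! := by
        rw [getElem!_pos (m.set k x) i (by simpa using h1), getElem!_pos m i h1]
        rw [List.getElem_set_ne (by omega)]
      rw [dif_pos (by rw [hlen, hget]; exact ⟨h1, h2⟩)]
      exact ih (by omega)
  | case2 i h =>
      rw [stopF]
      have hlen : (m.set k x).length = m.length := by simp
      by_cases hi : i < m.length
      · have hget : (m.set k x)[i]! = m[i]! := by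
          rw [getElem!_pos (m.set k x) i (by simpa using hi), getElem!_pos m i hi]
          rw [List.getElem_set_ne (by omega)]
        rw [dif_neg (by rw [hlen, hget]; exact h)]
      · rw [dif_neg (by rw [hlen]; omega)]

theorem length_leadFst (m : List String) (i : Nat) : (leadFst m i).length = m.length := by
  fun_induction leadFst m i with
  | case1 m i h ih => simpa using ih
  | case2 m i h => rfl

theorem leadFst_get (m : List String) (i : Nat) (j : Nat) :
    (leadFst m i)[j]? = if i ≤ j ∧ j < stopF m i then some "l" else m[j]? := by
  fun_induction leadFst m i with
  | case1 m i h ih =>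
      obtain ⟨h1, h2⟩ := h
      have hstop : stopF m i = stopF m (i + 1) := by
        rw [stopF, dif_pos ⟨h1, h2⟩]
      have hstop' : stopF (m.set i "l") (i + 1) = stopF m (i + 1) :=
        stopF_set_lt m i "l" (i + 1) (by omega)
      have hge : i + 1 ≤ stopF m (i + 1) := stopF_ge m (i + 1)
      rw [ih, hstop', hstop]
      by_cases hj : j = i
      · subst hj
        rw [if_neg (by omega), if_pos (by omega)]
        rw [List.getElem?_set_self']
        simp [List.getElem?_eq_getElem h1]
      · rw [List.getElem?_set_ne (by omega)]
        by_cases hc : i + 1 ≤ j ∧ j < stopF m (i + 1)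
        · rw [if_pos hc, if_pos (by omega)]
        · rw [if_neg hc, if_neg (by omega)]
  | case2 m i h =>
      rw [stopF, dif_neg h]
      rw [if_neg (by omega)]

theorem stopF_eq_of_no_b (m : List String) (i : Nat) (hi : i ≤ m.length)
    (hno : ∀ j, i ≤ j → (hj : j < m.length) → m[j] ≠ "b") : stopF m i = m.length := by
  fun_induction stopF m i with
  | case1 i h ih =>
      exact ih (by omega) (fun j hj hjl => hno j (by omega) hjl)
  | case2 i h =>
      by_cases hil : i < m.length
      · exfalso
        have : m[i]! ≠ "b" := by
          rw [getElem!_pos m i hil]; exact hno i (le_refl _) hil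
        exact h ⟨hil, this⟩
      · omega

theorem stopF_eq_of_b (m : List String) (i k : Nat) (hk : k < m.length) (hik : i ≤ k)
    (hb : m[k] = "b") (hno : ∀ j, i ≤ j → j < k → (hj : j < m.length) → m[j] ≠ "b") :
    stopF m i = k := by
  fun_induction stopF m i with
  | case1 i h ih =>
      have hik' : i ≠ k := by
        intro he; subst he
        rw [getElem!_pos m i h.1] at h
        exact h.2 hb
      exact ih (by omega) (fun j hj hjk hjl => hno j (by omega) hjk hjl)
  | case2 i h =>
      by_cases hik' : i = k
      · exact hik'
      · exfalso
        have hil : i < m.length := by omega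
        have : m[i]! ≠ "b" := by
          rw [getElem!_pos m i hil]; exact hno i (le_refl _) (by omega) hil
        exact h ⟨hil, this⟩

def stopB (m : List String) (i : Nat) : Nat :=
  if h : 0 < i ∧ m[i]! ≠ "b" then stopB m (i - 1) else i
termination_by i

theorem stopB_le (m : List String) (i : Nat) : stopB m i ≤ i := by
  fun_induction stopB m i with
  | case1 i h ih => omega
  | case2 i h => omega

theorem stopB_set_gt (m : List String) (k : Nat) (x : String) (i : Nat) (hk : i < k) :
    stopB (m.set k x) i = stopB m i := by
  fun_induction stopB m i with
  | case1 i h ih =>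
      obtain ⟨h1, h2⟩ := h
      rw [stopB]
      by_cases hil : i < m.length
      · have hget : (m.set k x)[i]! = m[i]! := by
          by_cases hkl : k < m.length
          · rw [getElem!_pos (m.set k x) i (by simpa using hil), getElem!_pos m i hil]
            rw [List.getElem_set_ne (by omega)]
          · rw [List.set_eq_of_length_le (by omega)]
        rw [dif_pos (by rw [hget]; exact ⟨h1, h2⟩)]
        exact ih (by omega)
      · rw [List.set_eq_of_length_le (by omega), dif_pos ⟨h1, h2⟩]
  | case2 i h =>
      rw [stopB]
      by_cases hil : i < m.length
      · have hget : (m.set k x)[i]! = m[i]! := by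
          by_cases hkl : k < m.length
          · rw [getElem!_pos (m.set k x) i (by simpa using hil), getElem!_pos m i hil]
            rw [List.getElem_set_ne (by omega)]
          · rw [List.set_eq_of_length_le (by omega)]
        rw [dif_neg (by rw [hget]; exact h)]
      · by_cases hkl : k < m.length
        · have hget : (m.set k x)[i]! = m[i]! := by
            rw [getElem!_neg (m.set k x) i (by simpa using hil), getElem!_neg m i hil]
          rw [dif_neg (by rw [hget]; exact h)]
        · rw [List.set_eq_of_length_le (by omega), dif_neg h]

theorem leadSnd_get (m : List String) (i : Nat) (hi : i < m.length) (j : Nat) :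
    (leadSnd m i)[j]? = if stopB m i < j ∧ j ≤ i then some "l" else m[j]? := by
  fun_induction leadSnd m i with
  | case1 m i h ih =>
      obtain ⟨h1, h2⟩ := h
      have hstop : stopB m i = stopB m (i - 1) := by
        rw [stopB, dif_pos ⟨h1, h2⟩]
      have hstop' : stopB (m.set i "l") (i - 1) = stopB m (i - 1) :=
        stopB_set_gt m i "l" (i - 1) (by omega)
      have hle : stopB m (i - 1) ≤ i - 1 := stopB_le m (i - 1)
      rw [ih (by simpa using by omega : i - 1 < (m.set i "l").length), hstop', hstop]
      by_cases hj : j = i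
      · subst hj
        rw [if_neg (by omega), if_pos (by omega)]
        rw [List.getElem?_set_self']
        simp [List.getElem?_eq_getElem hi]
      · rw [List.getElem?_set_ne (by omega)]
        by_cases hc : stopB m (i - 1) < j ∧ j ≤ i - 1
        · rw [if_pos hc, if_pos (by omega)]
        · rw [if_neg hc, if_neg (by omega)]
  | case2 m i h =>
      rw [stopB, dif_neg h]
      rw [if_neg (by omega)]

theorem stopB_eq_of_b (m : List String) (i k : Nat) (hk : k < m.length) (hki : k ≤ i)
    (hb : m[k] = "b") (hno : ∀ j, k < j → j ≤ i → (hj : j < m.length) → m[j] ≠ "b") :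
    stopB m i = k := by
  fun_induction stopB m i with
  | case1 i h ih =>
      have hik' : i ≠ k := by
        intro he
        rw [getElem!_pos m i (he ▸ hk)] at h
        exact h.2 (he ▸ hb)
      exact ih (by omega) (fun j hj hjk hjl => hno j hj (by omega) hjl)
  | case2 i h =>
      by_cases hik' : i = k
      · exact hik'
      · exfalso
        have hi0 : 0 < i := by omega
        by_cases hil : i < m.length
        · have : m[i]! ≠ "b" := by
            rw [getElem!_pos m i hil]; exact hno i (by omega) (le_refl _) hil
          exact h ⟨hi0, this⟩
        · have : m[i]! ≠ "b" := by
            rw [getElem!_neg m i (by omega)]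
            decide
          exact h ⟨hi0, this⟩

theorem stopB_eq_zero (m : List String) (i : Nat) (hi : i < m.length)
    (hno : ∀ j, 0 < j → j ≤ i → (hj : j < m.length) → m[j] ≠ "b") : stopB m i = 0 := by
  fun_induction stopB m i with
  | case1 i h ih =>
      exact ih (by omega) (fun j hj hjk hjl => hno j hj (by omega) hjl)
  | case2 i h =>
      by_cases hi0 : i = 0
      · exact hi0
      · exfalso
        have : m[i]! ≠ "b" := by
          rw [getElem!_pos m i hi]; exact hno i (by omega) (le_refl _) hi
        exact h ⟨by omega, this⟩

theorem stopF_eq_firstB (m : List String) : stopF m 0 = firstB m := by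
  rcases lt_or_eq_of_le (firstB_le m) with h | h
  · exact stopF_eq_of_b m 0 (firstB m) h (Nat.zero_le _) (firstB_lt_b m h)
      (fun j _ hjk hj => firstB_pre m j hjk hj)
  · rw [h]
    exact stopF_eq_of_no_b m 0 (Nat.zero_le _)
      (fun j _ hj => firstB_pre m j (by omega) hj)

theorem leadFst_eq_fpass (m : List String) : leadFst m 0 = fpass false m := by
  apply List.ext_getElem?
  intro j
  rw [leadFst_get m 0 j, fpass_get m j, stopF_eq_firstB]
  by_cases hc : j < firstB m
  · rw [if_pos ⟨Nat.zero_le _, hc⟩, if_pos hc]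
  · rw [if_neg (fun hx => hc hx.2), if_neg hc]

theorem main_equiv (mask : List String) : add_leads mask = add_leads_alt mask := by
  show leadSnd (leadFst mask 0) ((leadFst mask 0).length - 1) =
    (passB ((passB mask).reverse)).reverse
  rw [passB_eq, passB_eq, length_leadFst, leadFst_eq_fpass]
  set m1 := fpass false mask with hm1
  set n := mask.length with hn
  have hm1len : m1.length = n := fpass_length false mask
  rcases Nat.eq_zero_or_pos n with h0 | hpos
  · have hm1e : m1 = [] := List.eq_nil_of_length_eq_zero (by omega)
    rw [hm1e, leadSnd, dif_neg (fun hcon => absurd hcon.1 (by omega))]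
    simp [fpass]
  · have hrevlen : m1.reverse.length = n := by simpa using hm1len
    have hflen : (fpass false m1.reverse).length = n := by
      rw [fpass_length]; exact hrevlen
    set r := firstB m1.reverse with hr
    have hrle : r ≤ n := by rw [hr]; simpa [hrevlen] using firstB_le m1.reverse
    rcases lt_or_eq_of_le hrle with hrlt | hreq
    · -- there is a 'b' in m1; L = n - 1 - r is the last 'b' index
      set L := n - 1 - r with hL
      have hLlt : L < n := by omega
      have hbL : m1[L]'(by omega) = "b" := by
        have := firstB_lt_b m1.reverse (by omega)
        rw [List.getElem_reverse] at this
        convert this using 2 <;> omega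
      have hnoR : ∀ j, L < j → (hj : j < n) → m1[j]'(by omega) ≠ "b" := by
        intro j hLj hj
        have h1 : n - 1 - j < r := by omega
        have := firstB_pre m1.reverse (n - 1 - j) (by omega) (by omega)
        rw [List.getElem_reverse] at this
        convert this using 2 <;> omega
      have hstopB : stopB m1 (n - 1) = L := by
        apply stopB_eq_of_b m1 (n - 1) L (by omega) (by omega) hbL
        intro j hj hji hjl
        exact hnoR j hj (by omega)
      apply List.ext_getElem?
      intro j
      rw [leadSnd_get m1 (n - 1) (by omega) j, hstopB]
      by_cases hjn : j < n
      · rw [List.getElem?_reverse (l := fpass false m1.reverse) (i := j) (by omega),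
            hflen, fpass_get m1.reverse (n - 1 - j), ← hr,
            List.getElem?_reverse (l := m1) (i := n - 1 - j) (by omega), hm1len]
        have hidx : n - 1 - (n - 1 - j) = j := by omega
        rw [hidx]
        by_cases hc : L < j
        · rw [if_pos ⟨hc, by omega⟩, if_pos (by omega)]
        · rw [if_neg (by omega), if_neg (by omega)]
      · rw [if_neg (by omega)]
        rw [List.getElem?_eq_none (by omega),
            List.getElem?_eq_none (by simp only [List.length_reverse, hflen]; omega)]
    · -- no 'b' anywhere in m1: everything (in both results) is 'l'
      have hno : ∀ j, (hj : j < n) → m1[j]'(by omega) ≠ "b" := by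
        intro j hj
        have := firstB_pre m1.reverse (n - 1 - j) (by omega) (by omega)
        rw [List.getElem_reverse] at this
        convert this using 2 <;> omega
      -- hence no 'b' in mask either, so m1 is all 'l'
      have hfm : firstB mask = n := by
        by_contra hc
        have hlt : firstB mask < n := lt_of_le_of_ne (firstB_le mask) hc
        have hb := firstB_lt_b mask hlt
        have := fpass_get mask (firstB mask)
        rw [if_neg (by omega)] at this
        have hm1b : m1[firstB mask]'(by omega) = "b" := by
          have h2 : m1[firstB mask]? = some "b" := by
            rw [← hm1] at this
            rw [this, List.getElem?_eq_getElem hlt, hb]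
          rw [List.getElem?_eq_getElem (by omega)] at h2
          exact Option.some_inj.mp h2
        exact hno (firstB mask) hlt hm1b
      have hall : ∀ j, m1[j]? = if j < n then some "l" else none := by
        intro j
        rw [hm1, fpass_get, hfm]
        by_cases hc : j < n
        · rw [if_pos hc, if_pos hc]
        · rw [if_neg hc, if_neg hc, List.getElem?_eq_none (by omega)]
      have hfr : firstB m1.reverse = n := by omega
      have hstopB : stopB m1 (n - 1) = 0 :=
        stopB_eq_zero m1 (n - 1) (by omega) (fun j hj hji hjl => hno j (by omega))
      apply List.ext_getElem?
      intro j
      rw [leadSnd_get m1 (n - 1) (by omega) j, hstopB]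
      by_cases hjn : j < n
      · rw [List.getElem?_reverse (l := fpass false m1.reverse) (i := j) (by omega),
            hflen, fpass_get m1.reverse (n - 1 - j), hfr,
            if_pos (by omega : n - 1 - j < n)]
        by_cases hj0 : 0 < j
        · rw [if_pos ⟨hj0, by omega⟩]
        · rw [if_neg (by omega), hall j, if_pos hjn]
      · rw [if_neg (by omega), hall j, if_neg hjn,
            List.getElem?_eq_none (by simp only [List.length_reverse, hflen]; omega)]

-- ===== VERDICT (by name: the statement is the Claim_ definition above) =====
theorem add_leads_spec : Claim_equal_add_leads := by
  intro mask _
  unfold Spec_add_leads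
  exact main_equiv mask
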